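-- pv_equiv track=rewrite | github.com/arthurvico/python-proj6 | proj06.py | calc_totals
-- ===== SOURCE A (Python) =====
-- def calc_totals(data_sorted):
--     '''This function will take the list from the 2016 data function and return
--     a tuple of total values'''
--     #Set some initial values
--     total_native = 0
--     total_naturalized = 0
--     total_noncit = 0
--     total_res = 0
--     total_list = []
--     #Create a for loop for each item in the 2016 file read function (each tuple)
--     for item in data_sorted:
--         #Add the total amount of natives, naturalized and non-citizens
--         total_native += item[1]
--         total_naturalized += item[2]
--         total_noncit += item[4]
--         #Calculate the total amount of citizens
--         total_res = total_native + total_naturalized +total_noncit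
--     #Create a list with each item calculated
--     total_list.append(total_native)
--     total_list.append(total_naturalized)
--     total_list.append(total_noncit)
--     total_list.append(total_res)
--     #Make that list a tuple
--     total = tuple(total_list)
--     return (total)
-- ===== SOURCE B (Python) =====
-- def calc_totals(data_sorted):
--     tn = sum(r[1] for r in data_sorted)
--     tna = sum(r[2] for r in data_sorted)
--     tnc = sum(r[4] for r in data_sorted)
--     return (tn, tna, tnc, tn + tna + tnc)
-- ===== Notes on version B (the rewrite author's own statement) =====
-- stated objective: simpler
-- what changed: Replaces the single loop over four accumulators (with the running total recomputed each iteration) by three independent column sums and one final addition.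
import Mathlib
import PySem

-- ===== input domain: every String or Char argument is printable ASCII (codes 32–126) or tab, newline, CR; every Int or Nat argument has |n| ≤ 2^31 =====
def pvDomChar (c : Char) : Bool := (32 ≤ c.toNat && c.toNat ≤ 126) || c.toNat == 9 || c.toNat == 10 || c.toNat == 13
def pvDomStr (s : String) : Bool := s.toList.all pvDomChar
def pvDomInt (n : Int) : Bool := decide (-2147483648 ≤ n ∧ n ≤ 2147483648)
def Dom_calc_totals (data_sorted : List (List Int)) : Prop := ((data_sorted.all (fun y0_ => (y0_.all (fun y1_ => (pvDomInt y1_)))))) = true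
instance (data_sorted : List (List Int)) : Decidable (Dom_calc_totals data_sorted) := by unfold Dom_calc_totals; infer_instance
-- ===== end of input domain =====

-- B replaces A's single four-accumulator loop by three independent column sums plus one final addition (objective: simpler).


-- Python item[i] for nonnegative i, defaulting to 0 outside Pre_ (Pre_ guarantees the index is in range)
def colGet (i : Int) (r : List Int) : Int := (PySem.List.pyGet? r i).getD 0

-- ===== PORT A =====
-- one pass, state (total_native, total_naturalized, total_noncit, total_res); total_res recomputed each iteration
def calcStepA (s : Int × Int × Int × Int) (item : List Int) : Int × Int × Int × Int :=
  let tn := s.1 + colGet 1 item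
  let tna := s.2.1 + colGet 2 item
  let tnc := s.2.2.1 + colGet 4 item
  (tn, tna, tnc, tn + tna + tnc)

def calc_totals (data_sorted : List (List Int)) : List Int :=
  let s := data_sorted.foldl calcStepA (0, 0, 0, 0)
  [s.1, s.2.1, s.2.2.1, s.2.2.2]

-- ===== PORT B =====
def calc_totals_alt (data_sorted : List (List Int)) : List Int :=
  let tn := (data_sorted.map (colGet 1)).sum
  let tna := (data_sorted.map (colGet 2)).sum
  let tnc := (data_sorted.map (colGet 4)).sum
  [tn, tna, tnc, tn + tna + tnc]

-- ===== PRECONDITION & SPEC =====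
-- A indexes item[1], item[2], item[4]: rows shorter than 5 make A raise IndexError, so they are excluded.
def Pre_calc_totals (data_sorted : List (List Int)) : Prop :=
  ∀ r ∈ data_sorted, 5 ≤ r.length
instance (data_sorted : List (List Int)) : Decidable (Pre_calc_totals data_sorted) := by unfold Pre_calc_totals; infer_instance

def pvWitness_calc_totals : List (List Int) := [[7, 1, 2, 3, 4], [0, 10, 20, 30, 40]]

def Spec_calc_totals (data_sorted : List (List Int)) (out : List Int) : Prop := out = calc_totals_alt data_sorted
instance (data_sorted : List (List Int)) (out : List Int) : Decidable (Spec_calc_totals data_sorted out) := by unfold Spec_calc_totals; infer_instance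

-- ===== CLAIM (what is proved, stated in full; the proofs are below) =====
def Claim_equal_calc_totals : Prop := ∀ (data_sorted : List (List Int)), Dom_calc_totals data_sorted → Pre_calc_totals data_sorted → Spec_calc_totals data_sorted (calc_totals data_sorted)

-- ===== LEMMAS AND PROOFS =====
theorem foldl_calcStepA (l : List (List Int)) (a b c d0 : Int) :
    l.foldl calcStepA (a, b, c, d0) =
      (a + (l.map (colGet 1)).sum, b + (l.map (colGet 2)).sum, c + (l.map (colGet 4)).sum,
        if l = [] then d0
        else (a + (l.map (colGet 1)).sum) + (b + (l.map (colGet 2)).sum) + (c + (l.map (colGet 4)).sum)) := by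
  induction l generalizing a b c d0 with
  | nil => simp
  | cons x xs ih =>
      simp only [List.foldl_cons, calcStepA, ih]
      rcases eq_or_ne xs ([] : List (List Int)) with h | h <;>
        simp [h] <;> ring_nf <;> simp

-- ===== VERDICT (by name: the statement is the Claim_ definition above) =====
theorem calc_totals_spec : Claim_equal_calc_totals := by
  intro l _ _
  show calc_totals l = calc_totals_alt l
  simp only [calc_totals, calc_totals_alt, foldl_calcStepA]
  rcases eq_or_ne l ([] : List (List Int)) with h | h <;> simp [h]
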